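-- pv_equiv track=rewrite | github.com/8MISHRA/Web_Content_Similarity | simhash_similarity_checker.py | genHash_dict
-- ===== SOURCE A (Python) =====
-- def genHash_dict(word_dict):
--     """
--     Returns the dictionary containing key as a unique word and value as a tuple having the first element as its frequency and the second as its bit representation
--     """
--     p = 53
--     for key in word_dict:
--         sum = 0
--         for i in range(len(key)):
--             value = ord(key[i])*(p**i)
--             sum += value
--         sum = sum % 2**64
--
--         bin_value_base = bin(sum)[2:]
--         bin_value = bin_value_base.zfill(64)
--
--         word_dict[key] = (word_dict[key], str(bin_value))
--     return word_dict
-- ===== SOURCE B (Python) =====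
-- def genHash_dict(word_dict):
--     # Horner's rule over the reversed word: sum(ord(c_i)*53**i) equals the
--     # polynomial in 53 with ord(c_0) as the constant term, so folding
--     # h -> h*53 + ord(ch) over the characters from last to first computes it
--     # with no power variable, reduced mod 2**64 at every step.
--     M = 1 << 64
--     for word, freq in list(word_dict.items()):
--         h = 0
--         for ch in reversed(word):
--             h = (h * 53 + ord(ch)) % M
--         word_dict[word] = (freq, format(h, "064b"))
--     return word_dict
-- ===== Notes on version B (the rewrite author's own statement) =====
-- stated objective: alternative
-- what changed: The per-position bignum power p**i (with one big mod at the end) disappears entirely: B evaluates the polynomial by Horner's rule over the reversed word with a single accumulator h = (h*53 + ord(ch)) mod 2**64, and formats with format(h, '064b') instead of bin()[2:].zfill(64).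
import Mathlib
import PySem

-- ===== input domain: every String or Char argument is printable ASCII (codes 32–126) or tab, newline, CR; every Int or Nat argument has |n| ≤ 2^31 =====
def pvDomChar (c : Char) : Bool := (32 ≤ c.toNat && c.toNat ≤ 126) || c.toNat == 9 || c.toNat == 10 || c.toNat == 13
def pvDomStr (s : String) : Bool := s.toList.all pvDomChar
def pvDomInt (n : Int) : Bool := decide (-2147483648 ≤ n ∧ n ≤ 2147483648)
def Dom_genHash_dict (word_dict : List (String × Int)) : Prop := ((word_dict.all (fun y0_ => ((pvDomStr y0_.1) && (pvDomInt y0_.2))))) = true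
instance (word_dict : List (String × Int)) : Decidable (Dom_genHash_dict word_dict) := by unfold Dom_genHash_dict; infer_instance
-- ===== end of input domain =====

-- B replaces the per-position bignum power p**i by Horner's rule over the reversed word (single
-- accumulator, mod 2^64 each step); both A and B mutate the Python dict in place and return it, so
-- the proved equivalence about the returned value covers the side effect too.


-- ===== PORT A =====
-- A iterates over the dict's keys and reassigns each key's value in place; since the value type
-- changes, the port rebuilds the entry list in the same key order (dict keys are unique, so the
-- lookup word_dict[key] is the current entry's own value kv.2).
def genHash_dict (word_dict : List (String × Int)) : List (String × Int × String) :=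
  word_dict.map (fun kv =>
    let key := kv.1
    -- sum = 0; for i in range(len(key)): sum += ord(key[i]) * (p ** i)
    let sum : Int := (PySem.List.pyRange 0 (PySem.Str.len key) 1).foldl
      (fun s i => s + ((PySem.List.pyGetD key.toList i ' ').toNat : Int) * 53 ^ i.toNat) 0
    -- sum = sum % 2**64
    let sum := PySem.Int.mod sum (2 ^ 64)
    -- bin_value_base = bin(sum)[2:]; bin_value = bin_value_base.zfill(64)
    let bin_value_base := PySem.Str.slice (PySem.Int.pyBin sum) (some 2) none
    let bin_value := PySem.Str.zfill bin_value_base 64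
    (key, kv.2, bin_value))

-- ===== PORT B =====
-- M = 1 << 64; h = 0; for ch in reversed(word): h = (h*53 + ord(ch)) % M
def genHash_dict_alt (word_dict : List (String × Int)) : List (String × Int × String) :=
  word_dict.map (fun kv =>
    let h := kv.1.toList.reverse.foldl
      (fun (h : Int) ch => PySem.Int.mod (h * 53 + (ch.toNat : Int)) (1 <<< 64 : Int)) 0
    -- format(h, "064b")
    (kv.1, kv.2, PySem.Str.zfill (PySem.Int.toBin h) 64))

-- ===== PRECONDITION & SPEC =====
def Spec_genHash_dict (word_dict : List (String × Int)) (out : List (String × Int × String)) : Prop := out = genHash_dict_alt word_dict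
instance (word_dict : List (String × Int)) (out : List (String × Int × String)) : Decidable (Spec_genHash_dict word_dict out) := by unfold Spec_genHash_dict; infer_instance

-- ===== CLAIM (what is proved, stated in full; the proofs are below) =====
def Claim_equal_genHash_dict : Prop := ∀ (word_dict : List (String × Int)), Dom_genHash_dict word_dict → Spec_genHash_dict word_dict (genHash_dict word_dict)

-- ===== LEMMAS AND PROOFS =====

-- Horner form of Σ ord(c_i) · 53^i, the common value both per-word loops compute (mod 2^64)
def pvPoly : List Char → Int
  | [] => 0
  | c :: cs => (c.toNat : Int) + 53 * pvPoly cs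

theorem pvPoly_append_singleton (ys : List Char) (c : Char) :
    pvPoly (ys ++ [c]) = pvPoly ys + (c.toNat : Int) * 53 ^ ys.length := by
  induction ys with
  | nil => simp [pvPoly]
  | cons y ys ih => simp [pvPoly, ih]; ring

-- A's indexed loop computes pvPoly
theorem pvFoldA (cs : List Char) :
    (PySem.List.pyRange 0 (cs.length : Int) 1).foldl
      (fun s i => s + ((PySem.List.pyGetD cs i ' ').toNat : Int) * 53 ^ i.toNat) 0
    = pvPoly cs := by
  induction cs using List.reverseRecOn with
  | nil => simp [PySem.List.pyRange_one_eq_nil (le_refl 0), pvPoly]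
  | append_singleton ys c ih =>
    rw [show (((ys ++ [c]).length : Int)) = (ys.length : Int) + 1 by simp,
      PySem.List.pyRange_one_succ_right (by positivity), List.foldl_append]
    rw [PySem.List.foldl_congr_mem _ _
      (fun s i => s + ((PySem.List.pyGetD ys i ' ').toNat : Int) * 53 ^ i.toNat) 0
      (by
        intro acc i hi
        rcases (PySem.List.mem_pyRange_one).1 hi with ⟨h0, h1⟩
        have hlt : i < ((ys ++ [c]).length : Int) := by simp; omega
        simp only [PySem.List.pyGetD_eq_getElem _ ' ' h0 hlt,
          PySem.List.pyGetD_eq_getElem _ ' ' h0 h1]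
        have hnat : i.toNat < ys.length := by omega
        simp [hnat])]
    rw [ih]
    have hget : PySem.List.pyGetD (ys ++ [c]) (ys.length : Int) ' ' = c := by
      rw [PySem.List.pyGetD_eq_getElem _ _ (by positivity) (by simp)]
      simp
    simp only [List.foldl_cons, List.foldl_nil, hget, Int.toNat_natCast, pvPoly_append_singleton]

-- B's Horner loop over the reversed word computes pvPoly mod 2^64
theorem pvFoldB (cs : List Char) :
    cs.reverse.foldl
      (fun (h : Int) ch => PySem.Int.mod (h * 53 + (ch.toNat : Int)) (1 <<< 64 : Int)) 0
    = pvPoly cs % (2 ^ 64) := by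
  have hM : ((1 <<< 64 : Int)) = 2 ^ 64 := by decide
  have hpos : (0:Int) < 2 ^ 64 := by positivity
  rw [List.foldl_reverse]
  induction cs with
  | nil => simp [pvPoly]
  | cons c cs ih =>
    simp only [hM, PySem.Int.mod_eq_emod_of_pos hpos] at ih ⊢
    simp only [List.foldr_cons, ih, pvPoly]
    omega

-- bin(n)[2:] = format(n, 'b') for n ≥ 0
theorem pvBinEq (n : Int) (hn : 0 ≤ n) :
    PySem.Str.slice (PySem.Int.pyBin n) (some 2) none = PySem.Int.toBin n := by
  have h : ¬ n < 0 := not_lt.mpr hn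
  simp [PySem.Str.slice, PySem.Int.pyBin, PySem.Int.toBin, PySem.Int.toBinChars0b,
    PySem.Int.toBinChars, h, PySem.Chars.slice]
  rw [PySem.List.slice_from _ (by norm_num : (0:Int) ≤ 2)]
  simp

-- ===== VERDICT (by name: the statement is the Claim_ definition above) =====
theorem genHash_dict_spec : Claim_equal_genHash_dict := by
  intro wd _
  unfold Spec_genHash_dict genHash_dict genHash_dict_alt
  apply (List.map_congr_left ?_).symm
  intro kv _
  have hpos : (0:Int) < 2 ^ 64 := by positivity
  simp only [PySem.Str.len_eq]
  rw [pvFoldB kv.1.toList, pvFoldA kv.1.toList, PySem.Int.mod_eq_emod_of_pos hpos,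
    pvBinEq _ (Int.emod_nonneg _ (by positivity))]
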